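-- pv_equiv track=rewrite | github.com/haroldcristopher/TextBook_Topic | parsing.py | join_hyphenated_words
-- ===== SOURCE A (Python) =====
-- def join_hyphenated_words(words):
--     HYPHEN = "-"
--     i = 0
--     while i < len(words) - 1:
--         if words[i].endswith(HYPHEN):
--             words[i] = words[i].rstrip(HYPHEN) + words[i + 1]
--             del words[i + 1]
--         else:
--             i += 1
--     return words
-- ===== SOURCE B (Python) =====
-- def join_hyphenated_words(words):
--     # Two-phase: one enumerate pass partitions words into continuation groups,
--     # a second pass collapses each group into a single string.
--     # Mutates `words` in place (words[:] = result) and returns it, like A.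
--     groups = []
--     cur = []
--     n = len(words)
--     for i, w in enumerate(words):
--         cur.append(w)
--         if not (w.endswith("-") and i + 1 < n):
--             groups.append(cur)
--             cur = []
--     result = ["".join(x.rstrip("-") for x in g[:-1]) + g[-1] for g in groups]
--     words[:] = result
--     return words
-- ===== Notes on version B (the rewrite author's own statement) =====
-- stated objective: alternative
-- what changed: A repeatedly splices the list in place (rstrip+concat, del) under a while loop with a stalling index; B makes one forward pass partitioning the words into continuation groups and a second pass collapsing each group into one string, then assigns words[:] to keep A's in-place mutation.
import Mathlib
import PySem

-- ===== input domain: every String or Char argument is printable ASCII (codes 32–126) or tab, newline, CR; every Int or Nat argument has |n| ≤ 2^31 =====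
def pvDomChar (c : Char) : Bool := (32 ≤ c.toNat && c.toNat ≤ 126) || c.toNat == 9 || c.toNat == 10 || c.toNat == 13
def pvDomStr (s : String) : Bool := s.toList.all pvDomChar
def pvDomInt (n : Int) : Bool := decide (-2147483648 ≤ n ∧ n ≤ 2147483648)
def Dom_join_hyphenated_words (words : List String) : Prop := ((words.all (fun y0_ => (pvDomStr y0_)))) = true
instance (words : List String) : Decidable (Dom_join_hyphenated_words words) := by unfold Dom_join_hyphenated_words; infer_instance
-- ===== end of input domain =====

-- B groups the words in one forward pass and collapses each group, instead of A's in-place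
-- splicing loop; equivalence here is about the RETURN value (both Pythons also mutate the
-- argument in place to that same value).

-- ===== PORT A =====
-- s.rstrip("-"): strip all trailing '-' characters (hand-ported over List Char; exact)
def pvRstripH (s : String) : String :=
  String.ofList ((s.toList.reverse.dropWhile (fun c => c == '-')).reverse)

-- the while loop of A: state is (words, i); words[i] exists whenever i+1 < length
def pvJoinLoopA (ws : List String) (i : Nat) : List String :=
  if _h : i + 1 < ws.length then
    if PySem.Str.endswith (ws.getD i "") "-" then
      pvJoinLoopA ((ws.set i (pvRstripH (ws.getD i "") ++ ws.getD (i+1) "")).eraseIdx (i+1)) i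
    else
      pvJoinLoopA ws (i+1)
  else ws
termination_by ws.length - i
decreasing_by
  · simp only [List.length_eraseIdx, List.length_set]
    split <;> omega
  · omega

def join_hyphenated_words (words : List String) : List String := pvJoinLoopA words 0

-- ===== PORT B =====
-- ''.join(x.rstrip('-') for x in g[:-1]) + g[-1]  (groups are never empty, so g[-1] = getLastD)
def pvCollapseB (g : List String) : String :=
  PySem.Str.join "" (g.dropLast.map pvRstripH) ++ g.getLastD ""

-- one step of B's enumerate loop over state (groups, cur); n is len(words)
def pvStepB (n : Int) (st : List (List String) × List String) (p : Int × String) :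
    List (List String) × List String :=
  if PySem.Str.endswith p.2 "-" && decide (p.1 + 1 < n) then (st.1, st.2 ++ [p.2])
  else (st.1 ++ [st.2 ++ [p.2]], [])

def join_hyphenated_words_alt (words : List String) : List String :=
  ((PySem.List.enumerate words 0).foldl (pvStepB (words.length : Int)) ([], [])).1.map
    pvCollapseB

-- ===== PRECONDITION & SPEC =====
def Spec_join_hyphenated_words (words : List String) (out : List String) : Prop := out = join_hyphenated_words_alt words
instance (words : List String) (out : List String) : Decidable (Spec_join_hyphenated_words words out) := by unfold Spec_join_hyphenated_words; infer_instance

-- ===== CLAIM (what is proved, stated in full; the proofs are below) =====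
def Claim_equal_join_hyphenated_words : Prop := ∀ (words : List String), Dom_join_hyphenated_words words → Spec_join_hyphenated_words words (join_hyphenated_words words)

-- ===== LEMMAS AND PROOFS =====

-- common recursive characterisation of the result
def pvJ : List String → List String
  | [] => []
  | [w] => [w]
  | w :: v :: rest =>
    if PySem.Str.endswith w "-" then pvJ ((pvRstripH w ++ v) :: rest)
    else w :: pvJ (v :: rest)
termination_by l => l.length

-- B's grouping pass, recast as structural recursion on the word list (proof helper)
def pvGroupsRec (cur : List String) : List String → List (List String)
  | [] => []
  | w :: rest =>
    if PySem.Str.endswith w "-" && !rest.isEmpty then pvGroupsRec (cur ++ [w]) rest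
    else (cur ++ [w]) :: pvGroupsRec [] rest

-- string-level facts ------------------------------------------------------

theorem pv_toList_inj {s t : String} (h : s.toList = t.toList) : s = t := by
  have := congrArg String.ofList h
  simpa using this

theorem pv_endswith_iff (s : String) :
    PySem.Str.endswith s "-" = true ↔ s.toList.getLast? = some '-' := by
  rw [PySem.Str.endswith_eq, PySem.Chars.endswith_iff]
  constructor
  · rintro ⟨ys, hy⟩
    rw [← hy]
    simp
  · intro h
    rcases List.getLast?_eq_some_iff.mp h with ⟨ys, hy⟩
    exact ⟨ys, by simp [hy]⟩

theorem pv_rstripH_toList (s : String) :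
    (pvRstripH s).toList = (s.toList.reverse.dropWhile (fun c => c == '-')).reverse := by
  simp [pvRstripH]

-- rstrip never leaves a trailing hyphen
theorem pv_rstripH_noTrail (s : String) : (pvRstripH s).toList.getLast? ≠ some '-' := by
  rw [pv_rstripH_toList, List.getLast?_reverse]
  intro h
  have hne : s.toList.reverse.dropWhile (fun c => c == '-') ≠ [] := by
    intro hnil; rw [hnil] at h; simp at h
  have := List.head_dropWhile_not (p := fun c => c == '-') (l := s.toList.reverse) hne
  rw [List.head?_eq_head hne] at h
  simp_all

-- appending to a string without trailing hyphen: endswith determined by the suffix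
theorem pv_endswith_append (a b : String) (ha : a.toList.getLast? ≠ some '-') :
    PySem.Str.endswith (a ++ b) "-" = PySem.Str.endswith b "-" := by
  rw [Bool.eq_iff_iff, pv_endswith_iff, pv_endswith_iff, String.toList_append,
    List.getLast?_append]
  cases hb : b.toList.getLast? with
  | some c => simp
  | none => simp [ha]

-- rstrip distributes over append when the left part has no trailing hyphen
theorem pv_rstripH_append (a b : String) (ha : a.toList.getLast? ≠ some '-') :
    pvRstripH (a ++ b) = a ++ pvRstripH b := by
  apply pv_toList_inj
  rw [pv_rstripH_toList]
  simp only [String.toList_append, List.reverse_append, List.dropWhile_append]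
  rw [pv_rstripH_toList]
  by_cases h : (b.toList.reverse.dropWhile (fun c => c == '-')).isEmpty
  · have hd : a.toList.reverse.dropWhile (fun c => c == '-') = a.toList.reverse := by
      cases hre : a.toList.reverse with
      | nil => simp
      | cons x xs =>
        have hx : ¬ (x == '-') = true := by
          intro hx
          apply ha
          rw [← List.reverse_reverse a.toList, hre, List.getLast?_reverse]
          simp_all
        simp [List.dropWhile_cons, hx]
    simp [h, hd, List.isEmpty_iff.mp h]
  · simp [h]

-- pvJ characterises A's loop --------------------------------------------

theorem pvJ_pair (w v : String) (rest : List String) :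
    pvJ (w :: v :: rest) =
      if PySem.Str.endswith w "-" then pvJ ((pvRstripH w ++ v) :: rest)
      else w :: pvJ (v :: rest) := by
  rw [pvJ]

theorem pv_getD_len (a : List String) (x : String) (b : List String) :
    (a ++ x :: b).getD a.length "" = x := by
  simp [List.getD_eq_getElem?_getD, List.getElem?_append_right]

theorem pv_getD_len_succ (a : List String) (x y : String) (b : List String) :
    (a ++ x :: y :: b).getD (a.length + 1) "" = y := by
  have : a ++ x :: y :: b = (a ++ [x]) ++ y :: b := by simp
  rw [this, show a.length + 1 = (a ++ [x]).length by simp, pv_getD_len]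

theorem pvLoopA_split : ∀ (n : Nat) (t a : List String), t.length ≤ n →
    pvJoinLoopA (a ++ t) a.length = a ++ pvJ t := by
  intro n
  induction n with
  | zero =>
    intro t a h
    have ht : t = [] := List.eq_nil_of_length_eq_zero (by omega)
    subst ht
    rw [pvJoinLoopA]
    simp [pvJ]
  | succ n ih =>
    intro t a h
    rw [pvJoinLoopA]
    cases t with
    | nil => simp [pvJ]
    | cons w0 t1 =>
      cases t1 with
      | nil =>
        have : ¬ (a.length + 1 < (a ++ [w0]).length) := by simp
        simp only [this, dif_neg, not_false_iff]
        simp [pvJ]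
      | cons w1 t2 =>
        have hc : a.length + 1 < (a ++ w0 :: w1 :: t2).length := by
          simp only [List.length_append, List.length_cons]
          omega
        simp only [hc, dif_pos]
        rw [pv_getD_len, pv_getD_len_succ]
        by_cases hend : PySem.Str.endswith w0 "-" = true
        · simp only [hend, if_pos]
          have hset : (a ++ w0 :: w1 :: t2).set a.length (pvRstripH w0 ++ w1) =
              a ++ (pvRstripH w0 ++ w1) :: w1 :: t2 := by
            simp
          rw [hset]
          have herase : (a ++ (pvRstripH w0 ++ w1) :: w1 :: t2).eraseIdx (a.length + 1) =
              a ++ (pvRstripH w0 ++ w1) :: t2 := by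
            have h1 : a ++ (pvRstripH w0 ++ w1) :: w1 :: t2 =
                (a ++ [pvRstripH w0 ++ w1]) ++ w1 :: t2 := by simp
            rw [h1, show a.length + 1 = (a ++ [pvRstripH w0 ++ w1]).length by simp,
              List.eraseIdx_append]
            simp
          have hendc : PySem.Chars.endswith w0.toList ['-'] = true := by simpa using hend
          rw [herase, ih ((pvRstripH w0 ++ w1) :: t2) a (by simp at h ⊢; omega)]
          rw [pvJ_pair]
          all_goals simp [hendc]
        · simp only [hend, if_neg, not_false_iff]
          have h1 : a ++ w0 :: w1 :: t2 = (a ++ [w0]) ++ w1 :: t2 := by simp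
          rw [h1, show a.length + 1 = (a ++ [w0]).length by simp,
            ih (w1 :: t2) (a ++ [w0]) (by simp at h ⊢; omega)]
          have hendc : PySem.Chars.endswith w0.toList ['-'] = false := by simpa using hend
          rw [pvJ_pair]
          all_goals simp [hendc]

-- pvJ characterises B ----------------------------------------------------

-- the pending prefix carried by B's open group
def pvP (cur : List String) : String := PySem.Str.join "" (cur.map pvRstripH)

theorem pv_join_nil_flatten : ∀ (ls : List (List Char)), PySem.Chars.join [] ls = ls.flatten
  | [] => by simp [PySem.Chars.join_nil]
  | [p] => by simp [PySem.Chars.join_singleton]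
  | p :: q :: rest => by
    rw [PySem.Chars.join_cons_cons, pv_join_nil_flatten (q :: rest)]
    simp

theorem pvP_toList (cur : List String) :
    (pvP cur).toList = (cur.map (fun x => (pvRstripH x).toList)).flatten := by
  have h0 : ("" : String).toList = ([] : List Char) := by decide
  simp [pvP, PySem.Str.toList_join, h0, pv_join_nil_flatten, List.map_map, Function.comp_def]

theorem pvP_noTrail (cur : List String) : (pvP cur).toList.getLast? ≠ some '-' := by
  induction cur using List.reverseRecOn with
  | nil => simp [pvP_toList]
  | append_singleton xs x ih =>
    rw [pvP_toList] at *
    simp only [List.map_append, List.flatten_append, List.map_cons, List.map_nil,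
      List.flatten_cons, List.flatten_nil, List.append_nil]
    rw [List.getLast?_append]
    cases h : (pvRstripH x).toList.getLast? with
    | none => simpa [h] using ih
    | some c =>
      have := pv_rstripH_noTrail x
      simp [h] at this ⊢
      intro hc
      exact this (hc ▸ rfl)

theorem pvP_append (cur : List String) (w : String) :
    pvP (cur ++ [w]) = pvP cur ++ pvRstripH w := by
  apply pv_toList_inj
  simp [pvP_toList]

theorem pvCollapseB_eq (cur : List String) (w : String) :
    pvCollapseB (cur ++ [w]) = pvP cur ++ w := by
  simp [pvCollapseB, pvP]

theorem pvGroupsRec_eq_pvJ : ∀ (l : List String) (w : String) (cur : List String),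
    (pvGroupsRec cur (w :: l)).map pvCollapseB = pvJ ((pvP cur ++ w) :: l) := by
  intro l
  induction l with
  | nil =>
    intro w cur
    simp [pvGroupsRec, pvJ, pvCollapseB_eq]
  | cons v rest ih =>
    intro w cur
    rw [pvGroupsRec]
    have hend : PySem.Str.endswith (pvP cur ++ w) "-" = PySem.Str.endswith w "-" :=
      pv_endswith_append _ _ (pvP_noTrail cur)
    by_cases hw : PySem.Str.endswith w "-" = true
    · simp only [hw, List.isEmpty_cons, Bool.not_false, Bool.and_true, if_pos]
      rw [ih v (cur ++ [w]), pvP_append]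
      rw [pvJ_pair, hend]
      simp only [hw, if_pos]
      rw [pv_rstripH_append _ _ (pvP_noTrail cur)]
    · simp only [hw, Bool.false_and, Bool.not_false, if_neg, Bool.false_eq_true,
        not_false_iff]
      rw [List.map_cons, pvCollapseB_eq, ih v []]
      rw [pvJ_pair, hend]
      simp only [hw, if_neg, Bool.false_eq_true, not_false_iff]
      have : pvP [] ++ v = v := by
        apply pv_toList_inj
        simp [pvP_toList]
      rw [this]

-- the enumerate fold of port B computes pvGroupsRec (index bound ↔ nonempty rest)
theorem pvFoldB_eq : ∀ (l : List String) (w : String) (s n : Int)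
    (gs : List (List String)) (cur : List String),
    s + 1 + (l.length : Int) = n →
    (PySem.List.enumerate (w :: l) s).foldl (pvStepB n) (gs, cur) =
      (gs ++ pvGroupsRec cur (w :: l), []) := by
  intro l
  induction l with
  | nil =>
    intro w s n gs cur h
    have hb : (decide (s + 1 < n)) = false := by
      simp only [List.length_nil, Nat.cast_zero, add_zero] at h
      simp [h]
    simp [PySem.List.enumerate_cons, PySem.List.enumerate_nil, pvStepB, hb, pvGroupsRec]
  | cons v rest ih =>
    intro w s n gs cur h
    have hb : (decide (s + 1 < n)) = true := by
      rw [decide_eq_true_eq]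
      simp only [List.length_cons] at h
      push_cast at h
      omega
    rw [PySem.List.enumerate_cons, List.foldl_cons]
    have harith : (s + 1) + 1 + (rest.length : Int) = n := by
      simp only [List.length_cons] at h
      push_cast at h
      omega
    by_cases hw : PySem.Str.endswith w "-" = true
    · have hwc : PySem.Chars.endswith w.toList ['-'] = true := by simpa using hw
      have hstep : pvStepB n (gs, cur) (s, w) = (gs, cur ++ [w]) := by
        simp [pvStepB, hwc, hb]
      rw [hstep, ih v (s+1) n gs (cur ++ [w]) harith]
      have hg : pvGroupsRec cur (w :: v :: rest) = pvGroupsRec (cur ++ [w]) (v :: rest) := by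
        rw [pvGroupsRec]
        simp [hwc]
      rw [hg]
    · have hwc : PySem.Chars.endswith w.toList ['-'] = false := by simpa using hw
      have hstep : pvStepB n (gs, cur) (s, w) = (gs ++ [cur ++ [w]], []) := by
        simp [pvStepB, hwc, hb]
      rw [hstep, ih v (s+1) n (gs ++ [cur ++ [w]]) [] harith]
      have hg : pvGroupsRec cur (w :: v :: rest) = (cur ++ [w]) :: pvGroupsRec [] (v :: rest) := by
        rw [pvGroupsRec]
        simp [hwc]
      rw [hg]
      simp

-- ===== VERDICT (by name: the statement is the Claim_ definition above) =====
theorem join_hyphenated_words_spec : Claim_equal_join_hyphenated_words := by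
  intro words _
  unfold Spec_join_hyphenated_words join_hyphenated_words join_hyphenated_words_alt
  have h0 : pvJoinLoopA words 0 = [] ++ pvJ words := by
    simpa using pvLoopA_split words.length words [] (by omega)
  rw [h0]
  simp only [List.nil_append]
  cases words with
  | nil => simp [pvJ, PySem.List.enumerate_nil]
  | cons w l =>
    rw [pvFoldB_eq l w 0 (((w :: l).length : Int)) [] []
      (by push_cast [List.length_cons]; omega)]
    simp only [List.nil_append]
    have hw : pvP [] ++ w = w := by
      apply pv_toList_inj
      simp [pvP_toList]
    rw [pvGroupsRec_eq_pvJ l w [], hw]
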